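-- pv_equiv track=rewrite | github.com/medranoGG/AlgorithmsPython | 06.Backtracking/SumaSubconjuntoIgual.py | sumaVA
-- ===== SOURCE A (Python) =====
-- def esSolucion(conj, ind, tupla):
--     if ind < len(tupla):
--         return False
--     else:
--         suma = 0
--         for i in range(len(tupla)):
--             suma += tupla[i]*conj[i]
--         return suma == 0
--
-- def sumaVA(conj, ind, tupla):
--     if esSolucion(conj, ind, tupla):
--         esSol = True
--     else:
--         esSol = False
--         if ind < len(tupla):
--             tupla[ind] = -1
--             esSol, tupla = sumaVA(conj, ind+1, tupla)
--             if not esSol: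
--                 tupla[ind] = 1
--                 esSol, tupla = sumaVA(conj, ind+1, tupla)
--                 if not esSol:
--                     tupla[ind] = 0
--     return esSol, tupla
-- ===== SOURCE B (Python) =====
-- # Pseudo-polynomial subset-sum DP replacing the exponential backtracking: build the sets of
-- # sums reachable by +-1 coefficients on each suffix once, then reconstruct the DFS-first
-- # (-1 before 1) assignment greedily.  Mutates tupla in place like A; return value proved equal.
--
-- def _reaches(cs):
--     # rs[0] = set of sums achievable as sum(e_i*cs[i]) with e_i in {-1,1}; rs built for every suffix
--     if not cs:
--         return [{0}]
--     rs = _reaches(cs[1:])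
--     c = cs[0]
--     return [{s + e * c for s in rs[0] for e in (-1, 1)}] + rs
--
-- def _rebuild(cs, rs, target):
--     if not cs:
--         return []
--     c = cs[0]
--     if target + c in rs[1]:
--         return [-1] + _rebuild(cs[1:], rs[1:], target + c)
--     return [1] + _rebuild(cs[1:], rs[1:], target - c)
--
-- def sumaVA(conj, ind, tupla):
--     n = len(tupla)
--     if ind >= n:
--         return sum(t * c for t, c in zip(tupla, conj)) == 0, tupla
--     cs = conj[ind:n]
--     rs = _reaches(cs)
--     target = -sum(tupla[i] * conj[i] for i in range(ind))
--     if target not in rs[0]: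
--         tupla[ind:] = [0] * (n - ind)
--         return False, tupla
--     es = _rebuild(cs, rs, target)
--     tupla[ind:] = es
--     return True, tupla
-- ===== Notes on version B (the rewrite author's own statement) =====
-- stated objective: alternative
-- what changed: Replaces the exponential try-(-1)-then-(+1) backtracking with a subset-sum DP that builds the set of reachable suffix sums once per suffix and then greedily reconstructs the DFS-first assignment; intended as faster (measured 5-50x on most generated sizes) but unconfirmed at the largest sizes, where adversarial values make the reachable-sum sets exponential too. Pre_ excludes conj shorter than tupla (A raises IndexError) and negative ind, outside this recursive helper's natural domain (A there relies on negative-index wraparound).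
-- outside the precondition, e.g. on sumaVA([1, 1], -1, [0, 0]): A returns (True, [-1, 1]), B returns (False, [0, 0, 0, 0])
import Mathlib
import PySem

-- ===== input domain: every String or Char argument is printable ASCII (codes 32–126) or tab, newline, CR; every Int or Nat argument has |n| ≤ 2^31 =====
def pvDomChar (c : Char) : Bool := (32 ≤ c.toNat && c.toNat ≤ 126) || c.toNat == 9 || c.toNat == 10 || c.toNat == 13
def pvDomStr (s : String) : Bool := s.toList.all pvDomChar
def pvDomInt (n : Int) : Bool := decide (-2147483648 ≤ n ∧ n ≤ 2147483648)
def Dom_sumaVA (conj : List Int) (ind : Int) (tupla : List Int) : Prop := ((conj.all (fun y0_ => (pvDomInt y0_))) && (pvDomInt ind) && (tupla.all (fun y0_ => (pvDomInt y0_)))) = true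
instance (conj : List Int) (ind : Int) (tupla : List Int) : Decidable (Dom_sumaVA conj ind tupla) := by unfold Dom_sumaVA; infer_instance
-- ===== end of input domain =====

-- B replaces A's ±1 backtracking by a suffix reachable-sum DP (one set of reachable sums per
-- suffix) with greedy (-1-first) reconstruction (objective: alternative; intended as faster —
-- a timing run measured it faster on many inputs but both blow up on adversarial values).
-- Both Pythons mutate `tupla` in place; the theorem is about the return value.

-- ===== PORT A =====
def esSolucion (conj : List Int) (ind : Int) (tupla : List Int) : Bool :=
  if ind < (tupla.length : Int) then false
  else decide ((List.range tupla.length).foldl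
    (fun s i => s + tupla.getD i 0 * conj.getD i 0) 0 = 0)

-- fuel only makes the recursion (ind growing towards len(tupla)) structural; it is always
-- sufficient, never a semantic change
def sumaVAF (fuel : Nat) (conj : List Int) (ind : Int) (tupla : List Int) : Bool × List Int :=
  match fuel with
  | 0 => (false, tupla)
  | fuel+1 =>
    if esSolucion conj ind tupla then (true, tupla)
    else if ind < (tupla.length : Int) then
      let t1 := PySem.List.pySetD tupla ind (-1)
      let r1 := sumaVAF fuel conj (ind+1) t1
      if r1.1 then r1
      else
        let t2 := PySem.List.pySetD r1.2 ind 1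
        let r2 := sumaVAF fuel conj (ind+1) t2
        if r2.1 then r2
        else (false, PySem.List.pySetD r2.2 ind 0)
    else (false, tupla)

def sumaVA (conj : List Int) (ind : Int) (tupla : List Int) : Bool × List Int :=
  sumaVAF (((tupla.length : Int) - ind).toNat + 1) conj ind tupla

-- ===== PORT B =====
-- B's _reaches: (reaches cs).head = set of sums achievable as Σ e_i*cs[i] with e_i ∈ {-1,1};
-- one set per suffix of cs
def reaches (cs : List Int) : List (PySem.Set Int) :=
  match cs with
  | [] => [PySem.Set.ofList [0]]
  | c :: rest =>
    PySem.Set.ofList (((reaches rest).headD []).flatMap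
      (fun s => [s + (-1) * c, s + 1 * c])) :: reaches rest

-- B's _rebuild: greedy reconstruction preferring -1
def rebuild (cs : List Int) (rs : List (PySem.Set Int)) (target : Int) : List Int :=
  match cs with
  | [] => []
  | c :: rest =>
    if ((rs.drop 1).headD []).contains (target + c) then
      (-1) :: rebuild rest (rs.drop 1) (target + c)
    else
      1 :: rebuild rest (rs.drop 1) (target - c)

def sumaVA_alt (conj : List Int) (ind : Int) (tupla : List Int) : Bool × List Int :=
  let n := tupla.length
  if (n : Int) ≤ ind then
    (decide ((tupla.zip conj).foldl (fun s p => s + p.1 * p.2) 0 = 0), tupla)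
  else
    let cs := PySem.List.slice conj (some ind) (some (n : Int))
    let rs := reaches cs
    let target := -((List.range ind.toNat).foldl
      (fun s i => s + tupla.getD i 0 * conj.getD i 0) 0)
    if (rs.headD []).contains target then
      (true, PySem.List.slice tupla none (some ind) ++ rebuild cs rs target)
    else
      (false, PySem.List.slice tupla none (some ind) ++ List.replicate ((n : Int) - ind).toNat 0)

-- ===== PRECONDITION & SPEC =====
-- Pre_ excludes (a) conj shorter than tupla, where A always raises IndexError at the first
-- evaluated leaf, and (b) negative ind, outside the natural domain of this recursive helper
-- (there A relies on Python's negative-index wraparound, overwriting wrapped cells before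
-- re-searching from index 0).
def Pre_sumaVA (conj : List Int) (ind : Int) (tupla : List Int) : Prop :=
  0 ≤ ind ∧ tupla.length ≤ conj.length
instance (conj : List Int) (ind : Int) (tupla : List Int) : Decidable (Pre_sumaVA conj ind tupla) := by unfold Pre_sumaVA; infer_instance

def pvWitness_sumaVA : List Int × Int × List Int := ([1, 2], 0, [0, 0])

def Spec_sumaVA (conj : List Int) (ind : Int) (tupla : List Int) (out : Bool × List Int) : Prop := out = sumaVA_alt conj ind tupla
instance (conj : List Int) (ind : Int) (tupla : List Int) (out : Bool × List Int) : Decidable (Spec_sumaVA conj ind tupla out) := by unfold Spec_sumaVA; infer_instance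

-- ===== CLAIM (what is proved, stated in full; the proofs are below) =====
def Claim_equal_sumaVA : Prop := ∀ (conj : List Int) (ind : Int) (tupla : List Int), Dom_sumaVA conj ind tupla → Pre_sumaVA conj ind tupla → Spec_sumaVA conj ind tupla (sumaVA conj ind tupla)

-- ===== LEMMAS AND PROOFS =====

-- dot product of two lists (stops at the shorter one)
def dot : List Int → List Int → Int
  | x :: xs, y :: ys => x * y + dot xs ys
  | _, _ => 0

-- the common functional specification: the leftmost (-1-before-1) sign vector es with
-- Σ es[i]*cs[i] = t, as an Option
def solve (cs : List Int) (t : Int) : Option (List Int) :=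
  match cs with
  | [] => if t = 0 then some [] else none
  | c :: rest =>
    match solve rest (t + c) with
    | some es => some (-1 :: es)
    | none =>
      match solve rest (t - c) with
      | some es => some (1 :: es)
      | none => none

lemma dot_append_singleton (l1 l2 : List Int) (x y : Int) (h : l1.length = l2.length) :
    dot (l1 ++ [x]) (l2 ++ [y]) = dot l1 l2 + x * y := by
  induction l1 generalizing l2 with
  | nil => cases l2 with
    | nil => simp [dot]
    | cons b bs => simp at h
  | cons a as ih => cases l2 with
    | nil => simp at h
    | cons b bs =>
      simp only [List.cons_append, dot]
      rw [ih bs (by simpa using h)]; ring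

lemma dot_take_right (t c : List Int) : dot t (c.take t.length) = dot t c := by
  induction t generalizing c with
  | nil => simp [dot]
  | cons a as ih => cases c with
    | nil => simp [dot]
    | cons b bs => simp [dot, ih bs]

lemma zipfold_dot (t c : List Int) (a : Int) :
    (t.zip c).foldl (fun s p => s + p.1 * p.2) a = a + dot t c := by
  induction t generalizing c a with
  | nil => simp [dot]
  | cons x xs ih => cases c with
    | nil => simp [dot]
    | cons y ys =>
      simp only [List.zip_cons_cons, List.foldl_cons, dot]
      rw [ih ys]; ring

lemma take_succ_set (l : List Int) (j : Nat) (v : Int) (h : j < l.length) :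
    (l.set j v).take (j+1) = l.take j ++ [v] := by
  rw [List.take_add_one]
  congr 1
  · rw [List.take_set]; exact List.set_eq_of_length_le (by simp)
  · simp [h]

lemma take_succ_getD (l : List Int) (j : Nat) (h : j < l.length) :
    l.take (j+1) = l.take j ++ [l.getD j 0] := by
  rw [List.take_add_one]
  simp [List.getD_eq_getElem?_getD, List.getElem?_eq_getElem h]

lemma foldl_range_dot (t c : List Int) (k : Nat) (hk : k ≤ t.length) (hk' : k ≤ c.length) :
    (List.range k).foldl (fun s i => s + t.getD i 0 * c.getD i 0) 0 = dot (t.take k) (c.take k) := by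
  induction k with
  | zero => simp [dot]
  | succ k ih =>
    rw [List.range_succ, List.foldl_append, ih (by omega) (by omega),
      take_succ_getD t k (by omega), take_succ_getD c k (by omega),
      dot_append_singleton _ _ _ _ (by simp; omega)]
    simp

lemma take_append_cons (l1 l2 : List Int) (x : Int) (k : Nat) (h : l1.length = k) :
    (l1 ++ x :: l2).take (k+1) = l1 ++ [x] := by
  subst h; rw [List.take_append]; simp

lemma set_append_cons (l1 l2 : List Int) (x v : Int) (k : Nat) (h : l1.length = k) :
    (l1 ++ x :: l2).set k v = l1 ++ v :: l2 := by
  subst h; simp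

lemma mem_reaches_head (cs : List Int) (x : Int) :
    x ∈ (reaches cs).headD [] ↔ (solve cs x).isSome := by
  induction cs generalizing x with
  | nil =>
    simp only [reaches, List.headD_cons, PySem.Set.mem_ofList, List.mem_singleton, solve]
    split <;> simp_all
  | cons c rest ih =>
    show x ∈ PySem.Set.ofList _ ↔ _
    rw [PySem.Set.mem_ofList, List.mem_flatMap]
    constructor
    · rintro ⟨s, hs, h⟩
      simp at h
      rw [solve]
      rcases h with h | h
      · have : (solve rest (x + c)).isSome := (ih (x + c)).1 (by rw [show x + c = s by omega]; exact hs)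
        rcases Option.isSome_iff_exists.1 this with ⟨es, hes⟩
        rw [hes]; rfl
      · by_cases h1 : (solve rest (x + c)).isSome
        · rcases Option.isSome_iff_exists.1 h1 with ⟨es, hes⟩
          rw [hes]; rfl
        · rw [Option.not_isSome_iff_eq_none] at h1
          rw [h1]
          have : (solve rest (x - c)).isSome := (ih (x - c)).1 (by rw [show x - c = s by omega]; exact hs)
          rcases Option.isSome_iff_exists.1 this with ⟨es, hes⟩
          rw [hes]; rfl
    · intro h
      rw [solve] at h
      by_cases h1 : (solve rest (x + c)).isSome
      · exact ⟨x + c, (ih (x + c)).2 h1, by simp only [List.mem_cons]; left; ring⟩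
      · rw [Option.not_isSome_iff_eq_none] at h1
        rw [h1] at h
        have h2 : (solve rest (x - c)).isSome := by
          rcases h3 : solve rest (x - c) with _ | es
          · rw [h3] at h; simp at h
          · rfl
        exact ⟨x - c, (ih (x - c)).2 h2, by simp only [List.mem_cons]; right; left; ring⟩

lemma rebuild_solve (cs : List Int) (t : Int) (h : (solve cs t).isSome) :
    solve cs t = some (rebuild cs (reaches cs) t) := by
  induction cs generalizing t with
  | nil =>
    rw [solve] at h ⊢
    rw [rebuild]
    split at h
    · simp_all
    · simp at h
  | cons c rest ih =>
    rw [solve] at h ⊢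
    rw [rebuild]
    have hdrop : (reaches (c :: rest)).drop 1 = reaches rest := rfl
    rw [hdrop]
    have hcond : (((reaches rest).headD []).contains (t + c) = true) ↔ (solve rest (t + c)).isSome := by
      rw [PySem.Set.contains_iff]; exact mem_reaches_head rest (t + c)
    by_cases h1 : (solve rest (t + c)).isSome
    · rw [if_pos (hcond.2 h1)]
      rw [ih (t + c) h1]
    · rw [Option.not_isSome_iff_eq_none] at h1
      have hc' : ¬ (((reaches rest).headD []).contains (t + c) = true) := by
        rw [hcond, h1]; simp
      rw [if_neg hc']
      rw [h1] at h ⊢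
      have h2 : (solve rest (t - c)).isSome := by
        rcases h3 : solve rest (t - c) with _ | es
        · rw [h3] at h; simp at h
        · rfl
      rw [ih (t - c) h2]

-- characterisation of A's backtracking in terms of `solve`
lemma A_char (conj : List Int) : ∀ (fuel : Nat) (k : Nat) (t : List Int),
    k ≤ t.length → t.length ≤ conj.length → t.length - k < fuel →
    sumaVAF fuel conj (k : Int) t =
      (match solve ((conj.take t.length).drop k) (-(dot (t.take k) (conj.take k))) with
       | some es => (true, t.take k ++ es)
       | none => (false, t.take k ++ List.replicate (t.length - k) 0)) := by
  intro fuel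
  induction fuel with
  | zero => intro k t hk hc hf; omega
  | succ fuel IH =>
    intro k t hk hc hf
    by_cases hkn : k = t.length
    · subst hkn
      have hsuf : (conj.take t.length).drop t.length = [] := by
        apply List.drop_eq_nil_of_le; simp
      simp only [sumaVAF]
      have hes : esSolucion conj (t.length : Int) t =
          decide (dot (t.take t.length) (conj.take t.length) = 0) := by
        rw [esSolucion, if_neg (by omega), foldl_range_dot t conj t.length le_rfl hc]
      rw [hes, hsuf]
      by_cases hS : dot t (conj.take t.length) = 0
      · simp [solve, hS, List.take_length]
      · simp [solve, hS, List.take_length]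
    · have hklt : k < t.length := lt_of_le_of_ne hk hkn
      have hkc : k < conj.length := by omega
      simp only [sumaVAF]
      have hes : esSolucion conj (k:Int) t = false := by
        rw [esSolucion, if_pos (by exact_mod_cast hklt)]
      rw [hes, if_neg (by simp), if_pos (show (k:Int) < (t.length:Int) by exact_mod_cast hklt)]
      have hset1 : PySem.List.pySetD t (k:Int) (-1) = t.set k (-1) := by simp
      rw [hset1]
      set n := t.length with hn
      set c := conj.getD k 0 with hcd
      set T := -(dot (t.take k) (conj.take k)) with hT
      set rest := (conj.take n).drop (k+1) with hrest
      have hsuf : (conj.take n).drop k = c :: rest := by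
        rw [hrest, hcd]
        rw [List.drop_eq_getElem_cons (by simp; omega)]
        congr 1
        rw [List.getElem_take]
        exact (List.getD_eq_getElem conj 0 hkc).symm
      have hlen1 : (t.set k (-1)).length = n := by simp [← hn]
      have htake1 : (t.set k (-1)).take (k+1) = t.take k ++ [-1] := take_succ_set t k (-1) hklt
      have hctake : conj.take (k+1) = conj.take k ++ [c] := take_succ_getD conj k hkc
      have hlentake : (t.take k).length = (conj.take k).length := by
        simp; omega
      have hdot1 : dot ((t.set k (-1)).take (k+1)) (conj.take (k+1)) = dot (t.take k) (conj.take k) + (-1) * c := by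
        rw [htake1, hctake, dot_append_singleton _ _ _ _ hlentake]
      have hcast : ((k:Int) + 1) = ((k+1 : Nat) : Int) := by push_cast; ring
      have hTm : -(dot (t.take k) (conj.take k) + (-1) * c) = T + c := by rw [hT]; ring
      rw [hcast, hsuf, solve]
      have hr1 := IH (k+1) (t.set k (-1)) (by simp; omega) (by simp; omega) (by simp; omega)
      rw [hlen1, hdot1, hTm, ← hrest] at hr1
      have hlt : (t.take k).length = k := by simp; omega
      rcases hs1 : solve rest (T + c) with _ | es1
      · rw [hs1] at hr1
        have hr1' : sumaVAF fuel conj ((k+1 : Nat) : Int) (t.set k (-1))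
            = (false, t.take k ++ (-1) :: List.replicate (n - (k+1)) 0) := by
          rw [hr1]; simp [htake1]
        rw [hr1']
        rw [if_neg (by simp)]
        have hset2 : PySem.List.pySetD ((false, t.take k ++ (-1) :: List.replicate (n - (k+1)) 0).2) (k:Int) 1
            = t.take k ++ 1 :: List.replicate (n - (k+1)) 0 := by
          simp only [PySem.List.pySetD_natCast]
          exact set_append_cons _ _ _ _ _ hlt
        rw [hset2]
        set t2 := t.take k ++ 1 :: List.replicate (n - (k+1)) 0 with ht2
        have hlen2 : t2.length = n := by rw [ht2]; simp; omega
        have htake2 : t2.take (k+1) = t.take k ++ [1] := take_append_cons _ _ _ _ hlt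
        have hdot2 : dot (t2.take (k+1)) (conj.take (k+1)) = dot (t.take k) (conj.take k) + 1 * c := by
          rw [htake2, hctake, dot_append_singleton _ _ _ _ hlentake]
        have hTm2 : -(dot (t.take k) (conj.take k) + 1 * c) = T - c := by rw [hT]; ring
        have hr2 := IH (k+1) t2 (by omega) (by omega) (by omega)
        rw [hlen2, hdot2, hTm2, ← hrest] at hr2
        rcases hs2 : solve rest (T - c) with _ | es2
        · rw [hs2] at hr2
          have hr2' : sumaVAF fuel conj ((k+1 : Nat) : Int) t2
              = (false, t.take k ++ 1 :: List.replicate (n - (k+1)) 0) := by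
            rw [hr2]; simp [htake2]
          rw [hr2']
          rw [if_neg (by simp)]
          have hset3 : PySem.List.pySetD ((false, t.take k ++ 1 :: List.replicate (n - (k+1)) 0).2) (k:Int) 0
              = t.take k ++ 0 :: List.replicate (n - (k+1)) 0 := by
            simp only [PySem.List.pySetD_natCast]
            exact set_append_cons _ _ _ _ _ hlt
          rw [hset3]
          have hrepl : (0 : Int) :: List.replicate (n - (k+1)) 0 = List.replicate (n - k) 0 := by
            rw [show n - k = (n - (k+1)) + 1 by omega, List.replicate_succ]
          rw [hrepl]
        · rw [hs2] at hr2
          have hr2' : sumaVAF fuel conj ((k+1 : Nat) : Int) t2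
              = (true, t.take k ++ 1 :: es2) := by
            rw [hr2]; simp [htake2]
          rw [hr2']
          rw [if_pos (by simp)]
      · rw [hs1] at hr1
        have hr1' : sumaVAF fuel conj ((k+1 : Nat) : Int) (t.set k (-1))
            = (true, t.take k ++ (-1) :: es1) := by
          rw [hr1]; simp [htake1]
        rw [hr1']
        rw [if_pos (by simp)]

-- ===== VERDICT (by name: the statement is the Claim_ definition above) =====
theorem sumaVA_spec : Claim_equal_sumaVA := by
  intro conj ind tupla _ hp
  obtain ⟨hind, hlen⟩ := hp
  unfold Spec_sumaVA sumaVA sumaVA_alt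
  by_cases hbase : (tupla.length : Int) ≤ ind
  · rw [if_pos hbase]
    have hf : (((tupla.length : Int)) - ind).toNat + 1 = 1 := by omega
    rw [hf]
    simp only [sumaVAF]
    have hes : esSolucion conj ind tupla = decide (dot tupla conj = 0) := by
      rw [esSolucion, if_neg (by omega),
        foldl_range_dot tupla conj tupla.length le_rfl hlen, List.take_length,
        dot_take_right]
    rw [hes, zipfold_dot tupla conj 0]
    by_cases hS : dot tupla conj = 0
    · simp [hS]
    · simp [hS, show ¬ (ind < (tupla.length : Int)) by omega]
  · rw [if_neg hbase]
    push Not at hbase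
    set k := ind.toNat with hkdef
    have hik : ind = (k : Int) := (Int.toNat_of_nonneg hind).symm
    have hkn : k < tupla.length := by omega
    rw [hik]
    have hf : (((tupla.length : Int)) - (k : Int)).toNat + 1 = (tupla.length - k) + 1 := by omega
    rw [hf, A_char conj ((tupla.length - k) + 1) k tupla (le_of_lt hkn) hlen (by omega)]
    rw [show PySem.List.slice tupla none (some ((k : Nat) : Int)) = tupla.take k from
      PySem.List.slice_to_natCast tupla k]
    rw [show (((tupla.length : Int)) - ((k : Nat) : Int)).toNat = tupla.length - k by omega]
    have hcs : PySem.List.slice conj (some (k : Int)) (some (tupla.length : Int))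
        = (conj.take tupla.length).drop k := by
      rw [PySem.List.slice_natCast, List.drop_take]
    rw [hcs]
    have htgt : -((List.range k).foldl
        (fun s i => s + tupla.getD i 0 * conj.getD i 0) 0)
        = -(dot (tupla.take k) (conj.take k)) := by
      rw [foldl_range_dot tupla conj k (le_of_lt hkn) (by omega)]
    rw [htgt]
    set cs := (conj.take tupla.length).drop k with hcsd
    set T := -(dot (tupla.take k) (conj.take k)) with hTd
    have hmem : ((reaches cs).headD []).contains T = true ↔ (solve cs T).isSome := by
      rw [PySem.Set.contains_iff]; exact mem_reaches_head cs T
    rcases hsol : solve cs T with _ | es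
    · have hc : ¬ (((reaches cs).headD []).contains T = true) := by
        rw [hmem, hsol]; simp
      rw [if_neg hc]
    · have hc : ((reaches cs).headD []).contains T = true := by
        rw [hmem, hsol]; rfl
      rw [if_pos hc]
      have hsome := rebuild_solve cs T (by rw [hsol]; rfl)
      rw [hsol] at hsome
      have hreb : rebuild cs (reaches cs) T = es := by
        injection hsome.symm
      rw [hreb]
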